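-- pv_equiv track=rewrite | github.com/mohammadtakneshan/Dishcovery | backend/api/providers.py | sort_anthropic_models
-- ===== SOURCE A (Python) =====
-- from typing import Dict, List
--
-- def sort_anthropic_models(models: List[Dict]) -> List[Dict]:
--     """
--     Sort Anthropic models by recommendation priority.
--     Priority: Latest Sonnet > Latest Opus > Haiku (by date in model ID)
--     """
--     def get_priority(model: Dict) -> tuple:
--         model_id = model["id"]
--
--         # Extract model type (sonnet, opus, haiku)
--         if "sonnet" in model_id.lower():
--             type_priority = 0
--         elif "opus" in model_id.lower():
--             type_priority = 1
--         elif "haiku" in model_id.lower():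
--             type_priority = 2
--         else:
--             type_priority = 3
--
--         # Extract date (if present) - newer is better
--         # Model IDs like: claude-sonnet-4-20250514
--         parts = model_id.split("-")
--         date_str = "0"
--         for part in parts:
--             if part.isdigit() and len(part) == 8:  # Date format: YYYYMMDD
--                 date_str = part
--                 break
--
--         # Return tuple: (type_priority, -date) to sort by type first, then newest first
--         return (type_priority, -int(date_str))
--
--     return sorted(models, key=get_priority)
-- ===== SOURCE B (Python) =====
-- from typing import Dict, List
--
-- def sort_anthropic_models(models: List[Dict]) -> List[Dict]:
--     """Partition models into type buckets in one pass, then stably sort each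
--     bucket by newest date and concatenate the buckets in priority order."""
--     buckets = ([], [], [], [])
--
--     def type_index(model_id: str) -> int:
--         low = model_id.lower()
--         if "sonnet" in low:
--             return 0
--         if "opus" in low:
--             return 1
--         if "haiku" in low:
--             return 2
--         return 3
--
--     def date_key(model: Dict) -> int:
--         for part in model["id"].split("-"):
--             if part.isdigit() and len(part) == 8:
--                 return -int(part)
--         return 0
--
--     for model in models:
--         buckets[type_index(model["id"])].append(model)
--
--     result = []
--     for bucket in buckets:
--         result.extend(sorted(bucket, key=date_key))
--     return result
-- ===== Notes on version B (the rewrite author's own statement) =====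
-- stated objective: alternative
-- what changed: Replaces the single sorted() call with a lexicographic (type, -date) key by a one-pass order-preserving partition into four type buckets followed by a stable per-bucket sort on the date alone, concatenated in priority order.
import Mathlib
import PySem

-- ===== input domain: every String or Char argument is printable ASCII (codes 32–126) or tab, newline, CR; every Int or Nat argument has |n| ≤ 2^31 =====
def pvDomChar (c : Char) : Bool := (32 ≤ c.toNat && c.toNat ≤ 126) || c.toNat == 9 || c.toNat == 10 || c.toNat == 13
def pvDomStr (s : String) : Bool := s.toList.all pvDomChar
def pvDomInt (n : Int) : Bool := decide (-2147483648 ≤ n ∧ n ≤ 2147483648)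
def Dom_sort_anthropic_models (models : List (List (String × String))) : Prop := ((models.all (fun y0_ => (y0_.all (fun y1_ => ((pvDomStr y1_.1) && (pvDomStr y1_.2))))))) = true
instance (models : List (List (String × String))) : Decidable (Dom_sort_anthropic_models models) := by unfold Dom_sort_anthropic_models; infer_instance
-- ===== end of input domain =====

-- B replaces the single lexicographic sorted() call by an order-preserving partition into the
-- four type buckets followed by a stable per-bucket sort by date (objective: alternative).

-- ===== PORT A =====
-- get_priority, first component: the type-priority chain of ifs
def pvTypePriorityA (model_id : String) : Int :=
  if PySem.Str.isIn "sonnet" (PySem.Str.lower model_id) then 0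
  else if PySem.Str.isIn "opus" (PySem.Str.lower model_id) then 1
  else if PySem.Str.isIn "haiku" (PySem.Str.lower model_id) then 2
  else 3

-- the for-loop with break: first 8-digit all-digit part, default "0"
def pvFindDateA (parts : List String) : String :=
  match parts with
  | [] => "0"
  | p :: ps => if PySem.Str.strIsdigit p && (PySem.Str.len p == 8) then p else pvFindDateA ps

-- get_priority; model["id"] raises KeyError when absent — those inputs are outside Pre_ (getD "" is the totalisation);
-- split? is some since "-" ≠ "", and ofStr? is some on pvFindDateA's result ("0" or an all-digit part), so getD 0 is exact
def pvGetPriorityA (model : List (String × String)) : Int × Int :=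
  let model_id := (PySem.Dict.get? ⟨model⟩ "id").getD ""
  (pvTypePriorityA model_id,
   -((PySem.Int.ofStr? (pvFindDateA ((PySem.Str.split? model_id "-").getD []))).getD 0))

def sort_anthropic_models (models : List (List (String × String))) : List (List (String × String)) :=
  PySem.List.sorted2 models (fun m => (pvGetPriorityA m).1) (fun m => (pvGetPriorityA m).2) false

-- ===== PORT B =====
def pvModelIdB (model : List (String × String)) : String :=
  (PySem.Dict.get? ⟨model⟩ "id").getD ""   -- KeyError (no "id") is outside Pre_

def pvTypeIndexB (model_id : String) : Int :=
  if PySem.Str.isIn "sonnet" (PySem.Str.lower model_id) then 0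
  else if PySem.Str.isIn "opus" (PySem.Str.lower model_id) then 1
  else if PySem.Str.isIn "haiku" (PySem.Str.lower model_id) then 2
  else 3

-- date_key: return -int(part) at the first 8-digit all-digit part, else 0
def pvDateKeyAuxB (parts : List String) : Int :=
  match parts with
  | [] => 0
  | p :: ps =>
    if PySem.Str.strIsdigit p && (PySem.Str.len p == 8) then -((PySem.Int.ofStr? p).getD 0)
    else pvDateKeyAuxB ps

def pvDateKeyB (model : List (String × String)) : Int :=
  pvDateKeyAuxB ((PySem.Str.split? (pvModelIdB model) "-").getD [])

-- the single partition pass (appends at the end of the chosen bucket, order-preserving)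
def pvPartitionB (models : List (List (String × String))) :
    List (List (String × String)) × List (List (String × String)) ×
    List (List (String × String)) × List (List (String × String)) :=
  models.foldl (fun acc m =>
    let t := pvTypeIndexB (pvModelIdB m)
    if t = 0 then (acc.1 ++ [m], acc.2.1, acc.2.2.1, acc.2.2.2)
    else if t = 1 then (acc.1, acc.2.1 ++ [m], acc.2.2.1, acc.2.2.2)
    else if t = 2 then (acc.1, acc.2.1, acc.2.2.1 ++ [m], acc.2.2.2)
    else (acc.1, acc.2.1, acc.2.2.1, acc.2.2.2 ++ [m])) ([], [], [], [])

def sort_anthropic_models_alt (models : List (List (String × String))) : List (List (String × String)) :=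
  let b := pvPartitionB models
  PySem.List.sorted b.1 pvDateKeyB false ++ PySem.List.sorted b.2.1 pvDateKeyB false ++
  PySem.List.sorted b.2.2.1 pvDateKeyB false ++ PySem.List.sorted b.2.2.2 pvDateKeyB false

-- ===== PRECONDITION & SPEC =====
-- Pre_ excludes exactly the models without an "id" key, on which Python A raises KeyError
def Pre_sort_anthropic_models (models : List (List (String × String))) : Prop :=
  ∀ m ∈ models, (PySem.Dict.get? ⟨m⟩ "id").isSome
instance (models : List (List (String × String))) : Decidable (Pre_sort_anthropic_models models) := by
  unfold Pre_sort_anthropic_models; infer_instance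

def pvWitness_sort_anthropic_models : (List (List (String × String))) :=
  [[("id", "claude-sonnet-4-20250514")], [("id", "claude-opus-4-20250514")]]

def Spec_sort_anthropic_models (models : List (List (String × String))) (out : List (List (String × String))) : Prop := out = sort_anthropic_models_alt models
instance (models : List (List (String × String))) (out : List (List (String × String))) : Decidable (Spec_sort_anthropic_models models out) := by unfold Spec_sort_anthropic_models; infer_instance

-- ===== CLAIM (what is proved, stated in full; the proofs are below) =====
def Claim_equal_sort_anthropic_models : Prop := ∀ (models : List (List (String × String))), Dom_sort_anthropic_models models → Pre_sort_anthropic_models models → Spec_sort_anthropic_models models (sort_anthropic_models models)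

-- ===== LEMMAS AND PROOFS =====

-- insertBy unfolding on a cons (the brecOn definition's equation)
theorem pv_insertBy_cons {α : Type} (lb : α → α → Bool) (x y : α) (ys : List α) :
    PySem.List.insertBy lb x (y :: ys) =
      if lb x y then x :: y :: ys else y :: PySem.List.insertBy lb x ys := by
  simp [PySem.List.insertBy]

-- inserting into a three-part concatenation: passes over `as`, behaves like `cb` inside `cs`,
-- and stops at the front of `bs`
theorem pv_insertBy_split {α : Type} (lb cb : α → α → Bool) (x : α) (as cs bs : List α)
    (ha : ∀ a ∈ as, lb x a = false)
    (hc : ∀ c ∈ cs, lb x c = cb x c)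
    (hb : ∀ b ∈ bs, lb x b = true) :
    PySem.List.insertBy lb x (as ++ (cs ++ bs)) = as ++ (PySem.List.insertBy cb x cs ++ bs) := by
  induction as with
  | cons a as ih =>
    have h := ha a (by simp)
    simp only [List.cons_append, pv_insertBy_cons, h, Bool.false_eq_true, if_false]
    exact congrArg (a :: ·) (ih (fun a' h' => ha a' (by simp [h'])))
  | nil =>
    induction cs with
    | cons c cs ihc =>
      have h := hc c (by simp)
      simp only [List.nil_append, List.cons_append, pv_insertBy_cons, h]
      by_cases hcb : cb x c = true
      · simp [hcb]
      · simp only [Bool.not_eq_true] at hcb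
        simp only [hcb, Bool.false_eq_true, if_false, List.cons_append]
        exact congrArg (c :: ·) (ihc (fun c' h' => hc c' (by simp [h'])))
    | nil =>
      cases bs with
      | nil => simp [PySem.List.insertBy]
      | cons b bs => simp [pv_insertBy_cons, hb b (by simp), PySem.List.insertBy]

-- the lexicographic "before" test of sorted2 for Int keys
def pvLexB (k1 k2 : List (String × String) → Int) (a b : List (String × String)) : Bool :=
  decide (k1 a < k1 b) || (!decide (k1 b < k1 a) && decide (k2 a < k2 b))

-- generic bucket decomposition of the stable lexicographic sort, for k1-values in {0,1,2,3}
theorem pv_bucket_sort (xs : List (List (String × String)))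
    (k1 k2 : List (String × String) → Int)
    (h : ∀ x ∈ xs, k1 x = 0 ∨ k1 x = 1 ∨ k1 x = 2 ∨ k1 x = 3) :
    PySem.List.sorted2 xs k1 k2 false =
      PySem.List.sorted (xs.filter (fun x => k1 x == 0)) k2 false ++
      (PySem.List.sorted (xs.filter (fun x => k1 x == 1)) k2 false ++
      (PySem.List.sorted (xs.filter (fun x => k1 x == 2)) k2 false ++
      PySem.List.sorted (xs.filter (fun x => k1 x == 3)) k2 false)) := by
  induction xs using List.reverseRecOn with
  | nil => rfl
  | append_singleton xs x ih =>
    have hxs : ∀ y ∈ xs, k1 y = 0 ∨ k1 y = 1 ∨ k1 y = 2 ∨ k1 y = 3 :=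
      fun y hy => h y (by simp [hy])
    have hstep : PySem.List.sorted2 (xs ++ [x]) k1 k2 false =
        PySem.List.insertBy (pvLexB k1 k2) x (PySem.List.sorted2 xs k1 k2 false) := by
      show List.foldl _ _ (xs ++ [x]) = _
      rw [List.foldl_append]; rfl
    have hstep2 : ∀ (ys : List (List (String × String))),
        PySem.List.sorted (ys ++ [x]) k2 false =
        PySem.List.insertBy (fun a b => decide (k2 a < k2 b)) x (PySem.List.sorted ys k2 false) := by
      intro ys
      show List.foldl _ _ (ys ++ [x]) = _
      rw [List.foldl_append]
      rfl
    have hmem : ∀ (i : Int) (y : List (String × String)),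
        y ∈ PySem.List.sorted (xs.filter (fun z => k1 z == i)) k2 false → k1 y = i := by
      intro i y hy
      rw [PySem.List.mem_sorted] at hy
      have := (List.mem_filter.mp hy).2
      simpa using this
    rw [hstep, ih hxs]
    have hstep2' : ∀ (ys : List (List (String × String))),
        PySem.List.sorted (ys ++ [x]) k2 false =
        PySem.List.insertBy (fun a b => decide (k2 a < k2 b)) x (PySem.List.sorted ys k2 false) :=
      hstep2
    rcases h x (by simp) with hx | hx | hx | hx
    · -- bucket 0
      have heq := pv_insertBy_split (pvLexB k1 k2) (fun a b => decide (k2 a < k2 b)) x []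
            (PySem.List.sorted (xs.filter (fun z => k1 z == 0)) k2 false)
            (PySem.List.sorted (xs.filter (fun z => k1 z == 1)) k2 false ++
              (PySem.List.sorted (xs.filter (fun z => k1 z == 2)) k2 false ++
              PySem.List.sorted (xs.filter (fun z => k1 z == 3)) k2 false))
            (by simp)
            (fun c hc => by simp [pvLexB, hx, hmem 0 c hc])
            (fun b hb => by
              rcases List.mem_append.mp hb with hb | hb
              · simp [pvLexB, hx, hmem 1 b hb]
              rcases List.mem_append.mp hb with hb | hb
              · simp [pvLexB, hx, hmem 2 b hb]
              · simp [pvLexB, hx, hmem 3 b hb])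
      simp only [List.nil_append] at heq
      rw [heq]
      simp [List.filter_append, hx, hstep2']
    · -- bucket 1
      have heq := pv_insertBy_split (pvLexB k1 k2) (fun a b => decide (k2 a < k2 b)) x
            (PySem.List.sorted (xs.filter (fun z => k1 z == 0)) k2 false)
            (PySem.List.sorted (xs.filter (fun z => k1 z == 1)) k2 false)
            (PySem.List.sorted (xs.filter (fun z => k1 z == 2)) k2 false ++
              PySem.List.sorted (xs.filter (fun z => k1 z == 3)) k2 false)
            (fun a ha => by simp [pvLexB, hx, hmem 0 a ha])
            (fun c hc => by simp [pvLexB, hx, hmem 1 c hc])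
            (fun b hb => by
              rcases List.mem_append.mp hb with hb | hb
              · simp [pvLexB, hx, hmem 2 b hb]
              · simp [pvLexB, hx, hmem 3 b hb])
      -- heq already in the right shape
      rw [heq]
      simp [List.filter_append, hx, hstep2']
    · -- bucket 2
      have heq := pv_insertBy_split (pvLexB k1 k2) (fun a b => decide (k2 a < k2 b)) x
            (PySem.List.sorted (xs.filter (fun z => k1 z == 0)) k2 false ++
              PySem.List.sorted (xs.filter (fun z => k1 z == 1)) k2 false)
            (PySem.List.sorted (xs.filter (fun z => k1 z == 2)) k2 false)
            (PySem.List.sorted (xs.filter (fun z => k1 z == 3)) k2 false)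
            (fun a ha => by
              rcases List.mem_append.mp ha with ha | ha
              · simp [pvLexB, hx, hmem 0 a ha]
              · simp [pvLexB, hx, hmem 1 a ha])
            (fun c hc => by simp [pvLexB, hx, hmem 2 c hc])
            (fun b hb => by simp [pvLexB, hx, hmem 3 b hb])
      simp only [List.append_assoc] at heq
      rw [heq]
      simp [List.filter_append, hx, hstep2']
    · -- bucket 3
      have heq := pv_insertBy_split (pvLexB k1 k2) (fun a b => decide (k2 a < k2 b)) x
            (PySem.List.sorted (xs.filter (fun z => k1 z == 0)) k2 false ++
              (PySem.List.sorted (xs.filter (fun z => k1 z == 1)) k2 false ++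
              PySem.List.sorted (xs.filter (fun z => k1 z == 2)) k2 false))
            (PySem.List.sorted (xs.filter (fun z => k1 z == 3)) k2 false)
            []
            (fun a ha => by
              rcases List.mem_append.mp ha with ha | ha
              · simp [pvLexB, hx, hmem 0 a ha]
              rcases List.mem_append.mp ha with ha | ha
              · simp [pvLexB, hx, hmem 1 a ha]
              · simp [pvLexB, hx, hmem 2 a ha])
            (fun c hc => by simp [pvLexB, hx, hmem 3 c hc])
            (by simp)
      simp only [List.append_assoc, List.append_nil] at heq
      rw [heq]
      simp [List.filter_append, hx, hstep2']

-- A's date component equals B's date key, part list by part list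
theorem pv_date_eq (parts : List String) :
    -((PySem.Int.ofStr? (pvFindDateA parts)).getD 0) = pvDateKeyAuxB parts := by
  induction parts with
  | nil => decide
  | cons p ps ih =>
    simp only [pvFindDateA, pvDateKeyAuxB]
    split_ifs with hp
    · rfl
    · exact ih

-- the two key functions of the two ports agree
theorem pv_k1_eq (m : List (String × String)) :
    (pvGetPriorityA m).1 = pvTypeIndexB (pvModelIdB m) := rfl

theorem pv_k2_eq : (fun m => (pvGetPriorityA m).2) = pvDateKeyB := by
  funext m
  show -((PySem.Int.ofStr? (pvFindDateA _)).getD 0) = _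
  exact pv_date_eq _

-- the partition pass computes the four filters
theorem pv_partition_filter (models : List (List (String × String))) :
    pvPartitionB models =
      (models.filter (fun m => pvTypeIndexB (pvModelIdB m) == 0),
       models.filter (fun m => pvTypeIndexB (pvModelIdB m) == 1),
       models.filter (fun m => pvTypeIndexB (pvModelIdB m) == 2),
       models.filter (fun m => pvTypeIndexB (pvModelIdB m) == 3)) := by
  have key : ∀ (acc : List (List (String × String)) × List (List (String × String)) ×
      List (List (String × String)) × List (List (String × String))),
      models.foldl (fun acc m =>
        let t := pvTypeIndexB (pvModelIdB m)
        if t = 0 then (acc.1 ++ [m], acc.2.1, acc.2.2.1, acc.2.2.2)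
        else if t = 1 then (acc.1, acc.2.1 ++ [m], acc.2.2.1, acc.2.2.2)
        else if t = 2 then (acc.1, acc.2.1, acc.2.2.1 ++ [m], acc.2.2.2)
        else (acc.1, acc.2.1, acc.2.2.1, acc.2.2.2 ++ [m])) acc =
      (acc.1 ++ models.filter (fun m => pvTypeIndexB (pvModelIdB m) == 0),
       acc.2.1 ++ models.filter (fun m => pvTypeIndexB (pvModelIdB m) == 1),
       acc.2.2.1 ++ models.filter (fun m => pvTypeIndexB (pvModelIdB m) == 2),
       acc.2.2.2 ++ models.filter (fun m => pvTypeIndexB (pvModelIdB m) == 3)) := by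
    induction models with
    | nil => intro acc; simp
    | cons m ms ih =>
      intro acc
      have h4 : pvTypeIndexB (pvModelIdB m) = 0 ∨ pvTypeIndexB (pvModelIdB m) = 1 ∨
          pvTypeIndexB (pvModelIdB m) = 2 ∨ pvTypeIndexB (pvModelIdB m) = 3 := by
        unfold pvTypeIndexB; split_ifs <;> simp
      rcases h4 with ht | ht | ht | ht <;>
        simp [List.foldl_cons, ht, ih, List.append_assoc]
  have := key ([], [], [], [])
  simpa [pvPartitionB] using this

-- ===== VERDICT (by name: the statement is the Claim_ definition above) =====
set_option maxHeartbeats 1000000 in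
theorem sort_anthropic_models_spec : Claim_equal_sort_anthropic_models := by
  intro models _ _
  show sort_anthropic_models models = sort_anthropic_models_alt models
  unfold sort_anthropic_models sort_anthropic_models_alt
  rw [pv_bucket_sort models _ _ (by
    intro x _
    show (pvGetPriorityA x).1 = 0 ∨ _
    rw [pv_k1_eq]; unfold pvTypeIndexB; split_ifs <;> simp)]
  rw [pv_partition_filter]
  simp only [pv_k2_eq]
  have hf : ∀ i : Int, (fun x => (pvGetPriorityA x).1 == i) = (fun m => pvTypeIndexB (pvModelIdB m) == i) :=
    fun _ => rfl
  rw [hf 0, hf 1, hf 2, hf 3]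
  simp only [List.append_assoc]
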